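-- pv_equiv track=rewrite | github.com/adanzl/leetcode-practice | py/q1600/Q1655.py | canDistribute1
-- ===== SOURCE A (Python) =====
-- from collections import Counter
-- from functools import cache
-- from typing import List
--
-- def canDistribute1(nums: List[int], quantity: List[int]) -> bool:
--     lst = Counter(nums).values()
--     n = len(quantity)
--     quantity = sorted(quantity, reverse=True)
--
--     @cache
--     def dfs(lst, k):
--         if k == n:
--             return True
--         lst = list(lst)
--         for i in range(len(lst)):
--             if lst[i] >= quantity[k]:
--                 if dfs(tuple(lst[:i] + [lst[i] - quantity[k]] + lst[i + 1:]), k + 1):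
--                     return True
--         return False
--
--     return dfs(tuple(lst), 0)
-- ===== SOURCE B (Python) =====
-- from collections import Counter
--
--
-- def canDistribute1(nums, quantity):
--     # Buckets choose customer subsets (with feasibility pruning), instead of
--     # customers choosing buckets as in the original.
--     if not quantity:
--         return True
--     if not nums:
--         return False
--     counts = list(Counter(nums).values())
--     # a non-positive demand consumes nothing, so only positive demands matter
--     ws = sorted((q for q in quantity if q > 0), reverse=True)
--     if ws and ws[0] > max(counts):
--         return False
--
--     def splits(xs):
--         # all (taken, rest) order-preserving divisions of xs, take-first order
--         if not xs:
--             yield [], []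
--             return
--         head, tail = xs[0], xs[1:]
--         for taken, rest in splits(tail):
--             yield [head] + taken, rest
--         for taken, rest in splits(tail):
--             yield taken, [head] + rest
--
--     def go(cs, rem):
--         if not rem:
--             return True
--         if not cs:
--             return False
--         if sum(rem) > sum(cs):
--             return False
--         return any(sum(taken) <= cs[0] and go(cs[1:], rest)
--                    for taken, rest in splits(rem))
--
--     return go(counts, ws)
-- ===== Notes on version B (the rewrite author's own statement) =====
-- stated objective: alternative
-- what changed: A does a cached depth-first search in which customers (sorted by demand) successively pick a bucket; B inverts the recursion: it lets each bucket pick an order-preserving subset of the remaining positive demands (non-positive demands consume nothing), after cheap feasibility screens (empty cases, largest demand vs largest bucket) and a capacity prune (remaining demand vs remaining capacity).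
import Mathlib
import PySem

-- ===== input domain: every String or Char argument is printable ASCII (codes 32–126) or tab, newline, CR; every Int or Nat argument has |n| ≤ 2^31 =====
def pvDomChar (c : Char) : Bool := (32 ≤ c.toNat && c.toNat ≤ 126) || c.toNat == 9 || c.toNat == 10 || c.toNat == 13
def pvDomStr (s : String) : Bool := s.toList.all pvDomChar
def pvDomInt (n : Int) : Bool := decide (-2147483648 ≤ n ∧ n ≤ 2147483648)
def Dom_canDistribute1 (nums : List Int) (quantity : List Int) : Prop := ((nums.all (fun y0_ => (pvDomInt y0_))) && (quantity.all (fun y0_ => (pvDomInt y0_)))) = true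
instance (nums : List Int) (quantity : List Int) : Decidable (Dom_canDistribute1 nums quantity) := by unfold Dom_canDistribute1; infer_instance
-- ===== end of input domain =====

-- B replaces A's cached customer-by-customer DFS by a bucket-by-bucket subset search with
-- feasibility screens; same return value on every input (alternative decomposition, no speed claim).

-- ===== PORT A =====
-- Counter(nums).values()  (shared helper: both Pythons compute it with the same call)
def countValues (nums : List Int) : List Int :=
  (PySem.Dict.counter nums).values

-- A's @cache'd dfs (the cache does not change the value); the index k into the fixed sorted
-- quantity list is carried as the remaining suffix quantity[k:].  lst[i] with 0 ≤ i < len(lst)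
-- is List.getD (exact there); lst[:i]/lst[i+1:] with 0 ≤ i are take/drop (exact there).
def dfsA : List Int → List Int → Bool
  | _, [] => true
  | lst, q :: rest =>
    (List.range lst.length).any fun i =>
      decide (q ≤ lst.getD i 0) &&
        dfsA (lst.take i ++ [lst.getD i 0 - q] ++ lst.drop (i + 1)) rest

def canDistribute1 (nums : List Int) (quantity : List Int) : Bool :=
  dfsA (countValues nums) (PySem.List.sorted quantity (fun q => q) true)

-- ===== PORT B =====
-- all (taken, rest) order-preserving divisions of xs, take-first order
def splitsB : List Int → List (List Int × List Int)
  | [] => [([], [])]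
  | x :: t =>
    (splitsB t).map (fun p => (x :: p.1, p.2)) ++ (splitsB t).map (fun p => (p.1, x :: p.2))

def goB : List Int → List Int → Bool
  | _, [] => true
  | [], _ :: _ => false
  | c :: cs, r :: rem =>
    if (c :: cs).sum < (r :: rem).sum then false
    else (splitsB (r :: rem)).any fun p => decide (p.1.sum ≤ c) && goB cs p.2

def canDistribute1_alt (nums : List Int) (quantity : List Int) : Bool :=
  if quantity.isEmpty then true
  else if nums.isEmpty then false
  else
    let counts := countValues nums
    let ws := PySem.List.sorted (quantity.filter (fun q => decide (0 < q))) (fun q => q) true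
    match ws with
    | [] => goB counts ws
    | v :: _ =>
      -- counts is nonempty here (nums ≠ []), so Python's max(counts) is defined
      if decide ((PySem.List.max? counts (fun c => c)).getD 0 < v) then false
      else goB counts ws

-- ===== PRECONDITION & SPEC =====
def Spec_canDistribute1 (nums : List Int) (quantity : List Int) (out : Bool) : Prop := out = canDistribute1_alt nums quantity
instance (nums : List Int) (quantity : List Int) (out : Bool) : Decidable (Spec_canDistribute1 nums quantity out) := by unfold Spec_canDistribute1; infer_instance

-- ===== CLAIM (what is proved, stated in full; the proofs are below) =====
def Claim_equal_canDistribute1 : Prop := ∀ (nums : List Int) (quantity : List Int), Dom_canDistribute1 nums quantity → Spec_canDistribute1 nums quantity (canDistribute1 nums quantity)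

-- ===== LEMMAS AND PROOFS =====

-- "the buckets cs can absorb the demands ws": bucket by bucket, a sub-multiset of ws of
-- sum ≤ that bucket's capacity is taken.  Both ports are reduced to this predicate.
def SpecP : List Int → List Int → Prop
  | [], ws => ws = []
  | c :: cs, ws => ∃ s r, (s ++ r).Perm ws ∧ s.sum ≤ c ∧ SpecP cs r

-- A's sequential process with every demand clamped at 0
def ClampSeq : List Int → List Int → Prop
  | _, [] => True
  | lst, q :: rest =>
    ∃ i, ∃ h : i < lst.length, max q 0 ≤ lst[i] ∧ ClampSeq (lst.set i (lst[i] - max q 0)) rest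

lemma countValues_pos (nums : List Int) : ∀ c ∈ countValues nums, 1 ≤ c := by
  intro c hc
  unfold countValues at hc
  rw [PySem.Dict.values_eq_map_keys _ (PySem.Dict.nodup_keys_counter nums) 0] at hc
  obtain ⟨k, hk, rfl⟩ := List.mem_map.mp hc
  rw [PySem.Dict.getD_counter]
  have hkmem : k ∈ nums := by
    have := hk; simp [pysem] at this; exact this
  have : 1 ≤ nums.count k := List.count_pos_iff.mpr hkmem
  exact_mod_cast this

lemma countValues_ne_nil {nums : List Int} (h : nums ≠ []) : countValues nums ≠ [] := by
  unfold countValues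
  rw [PySem.Dict.values_eq_map_keys _ (PySem.Dict.nodup_keys_counter nums) 0]
  intro hmap
  rw [List.map_eq_nil_iff] at hmap
  obtain ⟨x, t, rfl⟩ := List.exists_cons_of_ne_nil h
  have : x ∈ PySem.Dict.keys (PySem.Dict.counter (x :: t)) := by simp [pysem]
  simp [hmap] at this

lemma dfsA_cons_iff (lst : List Int) (q : Int) (rest : List Int) :
    dfsA lst (q :: rest) = true ↔
      ∃ i, ∃ h : i < lst.length, q ≤ lst[i] ∧ dfsA (lst.set i (lst[i] - q)) rest = true := by
  rw [show dfsA lst (q :: rest) = (List.range lst.length).any fun i =>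
      decide (q ≤ lst.getD i 0) &&
        dfsA (lst.take i ++ [lst.getD i 0 - q] ++ lst.drop (i + 1)) rest from rfl]
  rw [List.any_eq_true]
  constructor
  · rintro ⟨i, hi, hb⟩
    rw [List.mem_range] at hi
    rw [Bool.and_eq_true, decide_eq_true_iff] at hb
    refine ⟨i, hi, ?_, ?_⟩
    · rw [← List.getD_eq_getElem lst 0 hi]; exact hb.1
    · have := hb.2
      rw [List.getD_eq_getElem lst 0 hi] at this
      rwa [List.set_eq_take_cons_drop _ hi, show lst.take i ++ (lst[i] - q) :: lst.drop (i+1)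
        = lst.take i ++ [lst[i] - q] ++ lst.drop (i+1) by simp]
  · rintro ⟨i, hi, hq, hd⟩
    refine ⟨i, List.mem_range.mpr hi, ?_⟩
    rw [Bool.and_eq_true, decide_eq_true_iff]
    constructor
    · rw [List.getD_eq_getElem lst 0 hi]; exact hq
    · rw [List.getD_eq_getElem lst 0 hi]
      rw [List.set_eq_take_cons_drop _ hi] at hd
      rwa [show lst.take i ++ [lst[i] - q] ++ lst.drop (i+1)
        = lst.take i ++ (lst[i] - q) :: lst.drop (i+1) by simp]


lemma nonneg_set {lst : List Int} {i : Nat} {v : Int} (hl : ∀ x ∈ lst, 0 ≤ x) (hv : 0 ≤ v) :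
    ∀ x ∈ lst.set i v, 0 ≤ x := by
  intro x hx
  rcases List.mem_or_eq_of_mem_set hx with h | rfl
  · exact hl x h
  · exact hv

lemma dfsA_nonpos (qs : List Int) : ∀ lst : List Int, (∀ q ∈ qs, q ≤ 0) → (∀ x ∈ lst, 0 ≤ x) →
    (dfsA lst qs = true ↔ (qs = [] ∨ lst ≠ [])) := by
  induction qs with
  | nil => intro lst _ _; simp [dfsA]
  | cons q rest ih =>
    intro lst hq hl
    rw [dfsA_cons_iff]
    constructor
    · rintro ⟨i, hi, _, _⟩
      right
      exact List.ne_nil_of_length_pos (by omega)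
    · rintro (h | h)
      · exact absurd h (by simp)
      · have h0 : 0 < lst.length := List.length_pos_iff.mpr h
        have hq0 : q ≤ 0 := hq q (List.mem_cons_self)
        have hle : q ≤ lst[0] := le_trans hq0 (hl _ (List.getElem_mem h0))
        refine ⟨0, h0, hle, ?_⟩
        have hrec := ih (lst.set 0 (lst[0] - q))
          (fun x hx => hq x (List.mem_cons_of_mem _ hx))
          (nonneg_set hl (by have := hl _ (List.getElem_mem h0); omega))
        rw [hrec]
        right
        simp [← List.length_pos_iff]
        omega

lemma clampSeq_nonpos (qs : List Int) : ∀ lst : List Int, (∀ q ∈ qs, q ≤ 0) → (∀ x ∈ lst, 0 ≤ x) →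
    (ClampSeq lst qs ↔ (qs = [] ∨ lst ≠ [])) := by
  induction qs with
  | nil => intro lst _ _; simp [ClampSeq]
  | cons q rest ih =>
    intro lst hq hl
    have hq0 : q ≤ 0 := hq q (List.mem_cons_self)
    have hmax : max q 0 = 0 := by omega
    constructor
    · rintro ⟨i, hi, _, _⟩
      right
      exact List.ne_nil_of_length_pos (by omega)
    · rintro (h | h)
      · exact absurd h (by simp)
      · have h0 : 0 < lst.length := List.length_pos_iff.mpr h
        refine ⟨0, h0, ?_, ?_⟩
        · rw [hmax]; exact hl _ (List.getElem_mem h0)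
        · rw [ih _ (fun x hx => hq x (List.mem_cons_of_mem _ hx))
            (nonneg_set hl (by have := hl _ (List.getElem_mem h0); omega))]
          right
          simp [← List.length_pos_iff]
          omega

lemma dfsA_iff_clampSeq (qs : List Int) : ∀ lst : List Int,
    qs.Pairwise (fun a b => b ≤ a) → (∀ x ∈ lst, 0 ≤ x) →
    (dfsA lst qs = true ↔ ClampSeq lst qs) := by
  induction qs with
  | nil => intro lst _ _; simp [dfsA, ClampSeq]
  | cons q rest ih =>
    intro lst hp hl
    obtain ⟨hhead, htail⟩ := List.pairwise_cons.mp hp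
    by_cases hq : 0 < q
    · have hmax : max q 0 = q := by omega
      rw [dfsA_cons_iff]
      show _ ↔ ∃ i, ∃ h : i < lst.length, max q 0 ≤ lst[i] ∧
        ClampSeq (lst.set i (lst[i] - max q 0)) rest
      rw [hmax]
      constructor
      · rintro ⟨i, hi, hle, hd⟩
        refine ⟨i, hi, hle, ?_⟩
        rw [← ih _ htail (nonneg_set hl (by have := hl _ (List.getElem_mem hi); omega))]
        exact hd
      · rintro ⟨i, hi, hle, hc⟩
        refine ⟨i, hi, hle, ?_⟩
        rw [ih _ htail (nonneg_set hl (by have := hl _ (List.getElem_mem hi); omega))]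
        exact hc
    · have hall : ∀ x ∈ q :: rest, x ≤ 0 := by
        intro x hx
        rcases List.mem_cons.mp hx with rfl | hx
        · omega
        · have := hhead x hx; omega
      rw [dfsA_nonpos _ _ hall hl, clampSeq_nonpos _ _ hall hl]


lemma specP_perm (cs : List Int) : ∀ {ws ws' : List Int}, ws.Perm ws' → (SpecP cs ws ↔ SpecP cs ws') := by
  induction cs with
  | nil =>
    intro ws ws' h
    constructor <;> (intro he; subst he)
    · exact h.symm.eq_nil
    · exact h.eq_nil
  | cons c cs ih =>
    intro ws ws' h
    constructor
    · rintro ⟨s, r, hp, hs, hr⟩; exact ⟨s, r, hp.trans h, hs, hr⟩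
    · rintro ⟨s, r, hp, hs, hr⟩; exact ⟨s, r, hp.trans h.symm, hs, hr⟩

lemma specP_nil (cs : List Int) (h : ∀ c ∈ cs, 0 ≤ c) : SpecP cs [] := by
  induction cs with
  | nil => rfl
  | cons c cs ih =>
    exact ⟨[], [], List.Perm.refl _, by simpa using h c List.mem_cons_self,
      ih (fun x hx => h x (List.mem_cons_of_mem _ hx))⟩

lemma specP_sum (cs : List Int) : ∀ ws : List Int, SpecP cs ws → ws.sum ≤ cs.sum := by
  induction cs with
  | nil => intro ws h; rw [h]
  | cons c cs ih =>
    rintro ws ⟨s, r, hp, hs, hr⟩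
    have := hp.sum_eq
    rw [List.sum_append] at this
    have := ih r hr
    simp only [List.sum_cons]
    omega

lemma specP_le_max (cs : List Int) : ∀ ws : List Int, (∀ x ∈ ws, 0 ≤ x) → SpecP cs ws →
    ∀ v ∈ ws, ∃ c ∈ cs, v ≤ c := by
  induction cs with
  | nil =>
    intro ws _ h v hv
    subst h; simp at hv
  | cons c cs ih =>
    rintro ws hnn ⟨s, r, hp, hs, hr⟩ v hv
    have hv' : v ∈ s ++ r := hp.mem_iff.mpr hv
    have hsub : ∀ x ∈ s ++ r, 0 ≤ x := fun x hx => hnn x (hp.mem_iff.mp hx)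
    rcases List.mem_append.mp hv' with h | h
    · refine ⟨c, List.mem_cons_self, le_trans ?_ hs⟩
      exact List.single_le_sum (fun x hx => hsub x (List.mem_append_left _ hx)) v h
    · obtain ⟨c', hc', hvc⟩ := ih r (fun x hx => hsub x (List.mem_append_right _ hx)) hr v h
      exact ⟨c', List.mem_cons_of_mem _ hc', hvc⟩

lemma specP_pick (cs : List Int) : ∀ (a : Int) (ws : List Int), 0 ≤ a → (∀ x ∈ ws, 0 ≤ x) →
    (SpecP cs (a :: ws) ↔ ∃ i, ∃ h : i < cs.length, a ≤ cs[i] ∧ SpecP (cs.set i (cs[i] - a)) ws) := by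
  induction cs with
  | nil =>
    intro a ws _ _
    constructor
    · intro h; exact absurd h (by simp [SpecP])
    · rintro ⟨i, hi, _⟩; exact absurd hi (by simp)
  | cons c cs ih =>
    intro a ws ha hws
    constructor
    · rintro ⟨s, r, hp, hs, hr⟩
      have hsubnn : ∀ x ∈ s ++ r, 0 ≤ x := by
        intro x hx
        rcases List.mem_cons.mp (hp.mem_iff.mp hx) with rfl | hx'
        · exact ha
        · exact hws x hx'
      have hmem : a ∈ s ++ r := hp.mem_iff.mpr List.mem_cons_self
      rcases List.mem_append.mp hmem with has | har
      · have hse : s.Perm (a :: s.erase a) := List.perm_cons_erase has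
        have hsum : s.sum = a + (s.erase a).sum := by
          have := hse.sum_eq; simpa using this
        have hnn : 0 ≤ (s.erase a).sum := by
          apply List.sum_nonneg
          intro x hx
          exact hsubnn x (List.mem_append_left _ (List.Sublist.mem hx List.erase_sublist))
        refine ⟨0, by simp, by simpa using by omega, ?_⟩
        show SpecP ((c - a) :: cs) ws
        refine ⟨s.erase a, r, ?_, by omega, hr⟩
        have h1 : ((a :: s.erase a) ++ r).Perm (a :: ws) := (hse.symm.append_right r).trans hp
        exact (h1 : (a :: (s.erase a ++ r)).Perm (a :: ws)).cons_inv
      · have hre : r.Perm (a :: r.erase a) := List.perm_cons_erase har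
        have hr' : SpecP cs (a :: r.erase a) := (specP_perm cs hre).mp hr
        have hnn' : ∀ x ∈ r.erase a, 0 ≤ x := by
          intro x hx
          exact hsubnn x (List.mem_append_right _ (List.Sublist.mem hx List.erase_sublist))
        obtain ⟨i, hi, hai, hspec⟩ := (ih a (r.erase a) ha hnn').mp hr'
        refine ⟨i + 1, by simpa using hi, by simpa using hai, ?_⟩
        show SpecP (c :: cs.set i (cs[i] - a)) ws
        refine ⟨s, r.erase a, ?_, hs, hspec⟩
        have step1 : (a :: (s ++ r.erase a)).Perm (s ++ a :: r.erase a) := List.perm_middle.symm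
        have step2 : (s ++ a :: r.erase a).Perm (s ++ r) := List.Perm.append_left s hre.symm
        exact ((step1.trans step2).trans hp).cons_inv
    · rintro ⟨i, hi, hai, hspec⟩
      match i with
      | 0 =>
        obtain ⟨s, r, hp', hs', hr'⟩ := hspec
        refine ⟨a :: s, r, ?_, ?_, hr'⟩
        · exact hp'.cons a
        · simp only [List.getElem_cons_zero] at hai
          simp only [List.sum_cons]
          have : s.sum ≤ c - a := hs'
          omega
      | j + 1 =>
        have hj : j < cs.length := by simpa using hi
        simp only [List.getElem_cons_succ] at hai
        have hspec' : SpecP (c :: cs.set j (cs[j] - a)) ws := hspec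
        obtain ⟨s, r, hp', hs', hr'⟩ := hspec'
        have hrnn : ∀ x ∈ r, 0 ≤ x := by
          intro x hx
          exact hws x (hp'.mem_iff.mp (List.mem_append_right _ hx))
        have : SpecP cs (a :: r) := (ih a r ha hrnn).mpr ⟨j, hj, hai, hr'⟩
        refine ⟨s, a :: r, ?_, hs', this⟩
        exact List.perm_middle.trans (hp'.cons a)

lemma clampSeq_iff_specP (qs : List Int) : ∀ lst : List Int, (∀ x ∈ lst, 0 ≤ x) →
    (ClampSeq lst qs ↔ SpecP lst (qs.map (fun q => max q 0))) := by
  induction qs with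
  | nil =>
    intro lst hl
    simp only [List.map_nil]
    exact ⟨fun _ => specP_nil lst hl, fun _ => trivial⟩
  | cons q rest ih =>
    intro lst hl
    simp only [List.map_cons]
    rw [specP_pick lst (max q 0) _ (by omega) (by
      intro x hx
      obtain ⟨y, _, rfl⟩ := List.mem_map.mp hx
      omega)]
    show (∃ i, ∃ h : i < lst.length, max q 0 ≤ lst[i] ∧
        ClampSeq (lst.set i (lst[i] - max q 0)) rest) ↔ _
    constructor
    · rintro ⟨i, hi, hle, hc⟩
      refine ⟨i, hi, hle, ?_⟩
      rw [← ih _ (nonneg_set hl (by have := hl _ (List.getElem_mem hi); omega))]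
      exact hc
    · rintro ⟨i, hi, hle, hc⟩
      refine ⟨i, hi, hle, ?_⟩
      rw [ih _ (nonneg_set hl (by have := hl _ (List.getElem_mem hi); omega))]
      exact hc

lemma specP_zero_cons (cs : List Int) : ∀ ws : List Int, cs ≠ [] →
    (SpecP cs (0 :: ws) ↔ SpecP cs ws) := by
  induction cs with
  | nil => intro ws h; exact absurd rfl h
  | cons c cs ih =>
    intro ws _
    constructor
    · rintro ⟨s, r, hp, hs, hr⟩
      have hmem : (0:Int) ∈ s ++ r := hp.mem_iff.mpr List.mem_cons_self
      rcases List.mem_append.mp hmem with h0 | h0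
      · have hse : s.Perm (0 :: s.erase 0) := List.perm_cons_erase h0
        have hsum : s.sum = (s.erase 0).sum := by
          have := hse.sum_eq; simpa using this
        refine ⟨s.erase 0, r, ?_, by omega, hr⟩
        have h1 : ((0 :: s.erase 0) ++ r).Perm ((0:Int) :: ws) := (hse.symm.append_right r).trans hp
        exact (h1 : ((0:Int) :: (s.erase 0 ++ r)).Perm (0 :: ws)).cons_inv
      · have hre : r.Perm (0 :: r.erase 0) := List.perm_cons_erase h0
        have hcs : cs ≠ [] := by
          rintro rfl
          have : r = [] := hr
          subst this
          simp at h0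
        have hr0 : SpecP cs (0 :: r.erase 0) := (specP_perm cs hre).mp hr
        have hr' : SpecP cs (r.erase 0) := (ih (r.erase 0) hcs).mp hr0
        refine ⟨s, r.erase 0, ?_, hs, hr'⟩
        have step1 : ((0:Int) :: (s ++ r.erase 0)).Perm (s ++ 0 :: r.erase 0) := List.perm_middle.symm
        have step2 : (s ++ (0:Int) :: r.erase 0).Perm (s ++ r) := List.Perm.append_left s hre.symm
        exact ((step1.trans step2).trans hp).cons_inv
    · rintro ⟨s, r, hp, hs, hr⟩
      exact ⟨0 :: s, r, hp.cons 0, by simpa using hs, hr⟩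

lemma specP_replicate_zero (k : Nat) (cs : List Int) (ws : List Int) (h : cs ≠ []) :
    SpecP cs (List.replicate k 0 ++ ws) ↔ SpecP cs ws := by
  induction k with
  | zero => simp
  | succ n ih =>
    rw [List.replicate_succ, List.cons_append, specP_zero_cons cs _ h]
    exact ih

lemma map_clamp_perm (qs : List Int) : ∃ k, (qs.map (fun q => max q 0)).Perm
    (List.replicate k 0 ++ qs.filter (fun q => decide (0 < q))) := by
  induction qs with
  | nil => exact ⟨0, by simp⟩
  | cons q rest ih =>
    obtain ⟨k, hk⟩ := ih
    by_cases hq : 0 < q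
    · refine ⟨k, ?_⟩
      have hmax : max q 0 = q := by omega
      rw [List.map_cons, hmax, List.filter_cons_of_pos (by simpa using hq)]
      have step1 : (q :: List.map (fun q => max q 0) rest).Perm
          (q :: (List.replicate k 0 ++ rest.filter (fun q => decide (0 < q)))) := hk.cons q
      have step2 : ((q:Int) :: (List.replicate k 0 ++ rest.filter (fun q => decide (0 < q)))).Perm
          (List.replicate k 0 ++ q :: rest.filter (fun q => decide (0 < q))) := List.perm_middle.symm
      exact step1.trans step2
    · refine ⟨k + 1, ?_⟩
      have hmax : max q 0 = 0 := by omega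
      rw [List.map_cons, hmax, List.filter_cons_of_neg (by simpa using hq)]
      rw [List.replicate_succ, List.cons_append]
      exact hk.cons 0

lemma goB_nil (cs : List Int) : goB cs [] = true := by cases cs <;> rfl

lemma splitsB_perm : ∀ (ws : List Int) (p : List Int × List Int), p ∈ splitsB ws → (p.1 ++ p.2).Perm ws := by
  intro ws
  induction ws with
  | nil => intro p hp; simp [splitsB] at hp; simp [hp]
  | cons x t ih =>
    intro p hp
    simp only [splitsB, List.mem_append, List.mem_map] at hp
    rcases hp with ⟨q, hq, rfl⟩ | ⟨q, hq, rfl⟩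
    · exact (ih q hq).cons x
    · exact List.perm_middle.trans ((ih q hq).cons x)

lemma splitsB_complete : ∀ (ws s r : List Int), (s ++ r).Perm ws →
    ∃ p ∈ splitsB ws, p.1.Perm s ∧ p.2.Perm r := by
  intro ws
  induction ws with
  | nil =>
    intro s r h
    have h1 : s ++ r = [] := h.eq_nil
    have hs : s = [] := by cases s <;> simp_all
    have hr : r = [] := by simp_all
    subst hs; subst hr
    exact ⟨([], []), by simp [splitsB]⟩
  | cons x t ih =>
    intro s r h
    have hx : x ∈ s ++ r := h.mem_iff.mpr List.mem_cons_self
    rcases List.mem_append.mp hx with hxs | hxr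
    · have hse : s.Perm (x :: s.erase x) := List.perm_cons_erase hxs
      have h2 : ((x :: s.erase x) ++ r).Perm (x :: t) := (hse.symm.append_right r).trans h
      have h3 : (s.erase x ++ r).Perm t :=
        (h2 : (x :: (s.erase x ++ r)).Perm (x :: t)).cons_inv
      obtain ⟨p, hp, h1p, h2p⟩ := ih (s.erase x) r h3
      refine ⟨(x :: p.1, p.2), ?_, ?_, h2p⟩
      · simp only [splitsB, List.mem_append, List.mem_map]
        exact Or.inl ⟨p, hp, by simp⟩
      · exact (h1p.cons x).trans hse.symm
    · have hre : r.Perm (x :: r.erase x) := List.perm_cons_erase hxr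
      have h2' : (s ++ (x :: r.erase x)).Perm (x :: t) := (List.Perm.append_left s hre.symm).trans h
      have h3 : (s ++ r.erase x).Perm t :=
        ((List.perm_middle.symm.trans h2') : (x :: (s ++ r.erase x)).Perm (x :: t)).cons_inv
      obtain ⟨p, hp, h1p, h2p⟩ := ih s (r.erase x) h3
      refine ⟨(p.1, x :: p.2), ?_, h1p, ?_⟩
      · simp only [splitsB, List.mem_append, List.mem_map]
        exact Or.inr ⟨p, hp, by simp⟩
      · exact (h2p.cons x).trans hre.symm

lemma goB_iff_specP (cs : List Int) : ∀ ws : List Int, (∀ c ∈ cs, 0 ≤ c) →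
    (goB cs ws = true ↔ SpecP cs ws) := by
  induction cs with
  | nil =>
    intro ws _
    cases ws with
    | nil => exact ⟨fun _ => rfl, fun _ => rfl⟩
    | cons w t => simp [goB]; exact fun h => absurd h (by simp [SpecP])
  | cons c cs ih =>
    intro ws hnn
    cases ws with
    | nil =>
      simp only [goB]
      constructor
      · intro _; exact specP_nil _ hnn
      · intro _; trivial
    | cons w t =>
      rw [show goB (c :: cs) (w :: t) = (if (c :: cs).sum < (w :: t).sum then false
          else (splitsB (w :: t)).any fun p => decide (p.1.sum ≤ c) && goB cs p.2) from rfl]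
      split_ifs with hsum
      · constructor
        · intro h; simp at h
        · intro h
          have := specP_sum (c :: cs) (w :: t) h
          omega
      · rw [List.any_eq_true]
        constructor
        · rintro ⟨p, hp, hb⟩
          rw [Bool.and_eq_true, decide_eq_true_iff] at hb
          have hperm := splitsB_perm (w :: t) p hp
          refine ⟨p.1, p.2, hperm, hb.1, ?_⟩
          exact (ih p.2 (fun x hx => hnn x (List.mem_cons_of_mem _ hx))).mp hb.2
        · rintro ⟨s, r, hp, hs, hr⟩
          obtain ⟨p, hpmem, h1p, h2p⟩ := splitsB_complete (w :: t) s r hp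
          refine ⟨p, hpmem, ?_⟩
          rw [Bool.and_eq_true, decide_eq_true_iff]
          constructor
          · rw [h1p.sum_eq]; exact hs
          · rw [ih p.2 (fun x hx => hnn x (List.mem_cons_of_mem _ hx))]
            exact (specP_perm cs h2p.symm).mp hr

lemma canDistribute1_eq (nums quantity : List Int) :
    canDistribute1 nums quantity = canDistribute1_alt nums quantity := by
  by_cases hq : quantity = []
  · subst hq
    simp [canDistribute1, canDistribute1_alt, dfsA, PySem.List.sorted]
  · by_cases hn : nums = []
    · subst hn
      obtain ⟨q, rest, hqs⟩ : ∃ q rest, PySem.List.sorted quantity (fun q => q) true = q :: rest := by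
        rcases hs : PySem.List.sorted quantity (fun q => q) true with _ | ⟨q, rest⟩
        · exact absurd ((PySem.List.sorted_eq_nil_iff _ _ _).mp hs) hq
        · exact ⟨q, rest, rfl⟩
      have hcv : countValues ([] : List Int) = [] := rfl
      rw [canDistribute1, hcv, hqs]
      have : dfsA [] (q :: rest) = false := rfl
      rw [this, canDistribute1_alt]
      simp [hq]
    · -- main case
      have hpos := countValues_pos nums
      have h0 : ∀ c ∈ countValues nums, 0 ≤ c := fun c hc => le_trans (by omega) (hpos c hc)
      have hcne := countValues_ne_nil hn
      set counts := countValues nums with hcounts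
      set qsS := PySem.List.sorted quantity (fun q => q) true with hqsS
      set fp := quantity.filter (fun q => decide (0 < q)) with hfp
      set ws := PySem.List.sorted fp (fun q => q) true with hws
      have hwsnn : ∀ x ∈ ws, 0 ≤ x := by
        intro x hx
        rw [hws, PySem.List.mem_sorted] at hx
        rw [hfp, List.mem_filter] at hx
        have := hx.2; simp at this; omega
      have hA : (canDistribute1 nums quantity = true) ↔ SpecP counts ws := by
        rw [canDistribute1, ← hcounts, ← hqsS]
        rw [dfsA_iff_clampSeq qsS counts (by
          have := PySem.List.sorted_pairwise_rev quantity (fun q => q)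
          rw [← hqsS] at this
          exact this) h0]
        rw [clampSeq_iff_specP qsS counts h0]
        have p1 : (qsS.map (fun q => max q 0)).Perm (quantity.map (fun q => max q 0)) := by
          exact (PySem.List.sorted_perm quantity (fun q => q) true).map _
        rw [specP_perm counts p1]
        obtain ⟨k, hk⟩ := map_clamp_perm quantity
        rw [specP_perm counts hk]
        rw [← hfp, specP_replicate_zero k counts fp hcne]
        exact (specP_perm counts (PySem.List.sorted_perm fp (fun q => q) true)).symm.trans
          (by rw [hws])
      have hqe : quantity.isEmpty = false := by simpa using hq
      have hne : nums.isEmpty = false := by simpa using hn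
      rw [canDistribute1_alt, hqe, hne]
      simp only [Bool.false_eq_true, if_false]
      rw [← hcounts, ← hfp, ← hws]
      rcases hwsc : ws with _ | ⟨v, t⟩
      · -- ws = []
        have : SpecP counts ws := by rw [hwsc]; exact specP_nil counts h0
        have hAt : canDistribute1 nums quantity = true := hA.mpr this
        rw [hAt]
        exact (goB_nil counts).symm
      · rw [← hwsc]
        by_cases hguard : (PySem.List.max? counts (fun c => c)).getD 0 < v
        · have hnotspec : ¬ SpecP counts ws := by
            intro hspec
            obtain ⟨c, hc, hvc⟩ := specP_le_max counts ws hwsnn hspec v (by rw [hwsc]; exact List.mem_cons_self)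
            obtain ⟨m, hm⟩ : ∃ m, PySem.List.max? counts (fun c => c) = some m := by
              rcases hmx : PySem.List.max? counts (fun c => c) with _ | m
              · exact absurd ((PySem.List.max?_eq_none_iff _ _).mp hmx) hcne
              · exact ⟨m, rfl⟩
            have hcm : c ≤ m := PySem.List.max?_isMax hm c hc
            rw [hm] at hguard
            simp at hguard
            omega
          have : canDistribute1 nums quantity = false := by
            rcases hb : canDistribute1 nums quantity
            · rfl
            · exact absurd (hA.mp hb) hnotspec
          rw [this, hwsc]
          simp [hguard]
        · rw [hwsc]
          simp only [hguard, decide_false, Bool.false_eq_true, if_false]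
          rw [← hwsc]
          rw [Bool.eq_iff_iff, hA, goB_iff_specP counts ws h0]

-- ===== VERDICT (by name: the statement is the Claim_ definition above) =====
theorem canDistribute1_spec : Claim_equal_canDistribute1 := by
  intro nums quantity _
  unfold Spec_canDistribute1
  exact canDistribute1_eq nums quantity
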